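-- pv_equiv track=rewrite | github.com/yimgao/OmniDoc | backend/src/utils/document_organizer.py | get_document_level
-- ===== SOURCE A (Python) =====
-- from enum import Enum
--
-- class DocumentLevel(str, Enum):
--     """Document levels"""
--     LEVEL_1_STRATEGIC = "Level 1: Strategic (Entrepreneur)"
--     LEVEL_2_PRODUCT = "Level 2: Product (Product Manager)"
--     LEVEL_3_TECHNICAL = "Level 3: Technical (Programmer)"
--     CROSS_LEVEL = "Cross-Level (Everyone)"
--
-- DOCUMENT_LEVEL_MAPPING = {
--     # Level 1: Strategic (Entrepreneur)
--     "requirements": DocumentLevel.LEVEL_1_STRATEGIC,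
--     "requirements_analyst": DocumentLevel.LEVEL_1_STRATEGIC,
--     "stakeholder_documentation": DocumentLevel.LEVEL_1_STRATEGIC,
--     "stakeholder_communication": DocumentLevel.LEVEL_1_STRATEGIC,
--     "project_charter": DocumentLevel.LEVEL_1_STRATEGIC,
--     "business_model": DocumentLevel.LEVEL_1_STRATEGIC,
--     "marketing_plan": DocumentLevel.LEVEL_1_STRATEGIC,
--
--     # Level 2: Product (Product Manager)
--     "pm_documentation": DocumentLevel.LEVEL_2_PRODUCT,
--     "user_stories": DocumentLevel.LEVEL_2_PRODUCT,
--     "wbs_agent": DocumentLevel.LEVEL_2_PRODUCT,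
--     "work_breakdown_structure": DocumentLevel.LEVEL_2_PRODUCT,
--
--     # Level 3: Technical (Programmer)
--     "technical_documentation": DocumentLevel.LEVEL_3_TECHNICAL,
--     "api_documentation": DocumentLevel.LEVEL_3_TECHNICAL,
--     "database_schema": DocumentLevel.LEVEL_3_TECHNICAL,
--     "setup_guide": DocumentLevel.LEVEL_3_TECHNICAL,
--     "legal_compliance": DocumentLevel.LEVEL_3_TECHNICAL,
--
--     # Cross-Level (Everyone)
--     "developer_documentation": DocumentLevel.CROSS_LEVEL,
--     "user_documentation": DocumentLevel.CROSS_LEVEL,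
--     "test_documentation": DocumentLevel.CROSS_LEVEL,
--     "support_playbook": DocumentLevel.CROSS_LEVEL,
--     "quality_reviewer": DocumentLevel.CROSS_LEVEL,
--     "format_converter": DocumentLevel.CROSS_LEVEL,
--     "claude_cli_documentation": DocumentLevel.CROSS_LEVEL,
-- }
--
-- def get_document_level(doc_type: str) -> DocumentLevel:
--     """
--     Get the level for a document type
--
--     Args:
--         doc_type: Document type identifier
--
--     Returns:
--         DocumentLevel enum value
--     """
--     # Normalize doc_type (remove underscores, lowercase)
--     normalized = doc_type.lower().replace('_', '').replace('-', '')
--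
--     # Try direct match first
--     if doc_type in DOCUMENT_LEVEL_MAPPING:
--         return DOCUMENT_LEVEL_MAPPING[doc_type]
--
--     # Try normalized match
--     for key, level in DOCUMENT_LEVEL_MAPPING.items():
--         key_normalized = key.lower().replace('_', '').replace('-', '')
--         if key_normalized == normalized:
--             return level
--
--     # Default to cross-level if not found
--     return DocumentLevel.CROSS_LEVEL
-- ===== SOURCE B (Python) =====
-- from enum import Enum
--
-- class DocumentLevel(str, Enum):
--     """Document levels"""
--     LEVEL_1_STRATEGIC = "Level 1: Strategic (Entrepreneur)"
--     LEVEL_2_PRODUCT = "Level 2: Product (Product Manager)"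
--     LEVEL_3_TECHNICAL = "Level 3: Technical (Programmer)"
--     CROSS_LEVEL = "Cross-Level (Everyone)"
--
-- # Reverse index: for each non-default level, the set of normalized document-type
-- # names that belong to it.  All 23 normalized names in the original mapping are
-- # distinct, and the CROSS_LEVEL group is omitted entirely because CROSS_LEVEL is
-- # also the default, so membership order between groups cannot matter.
-- _LEVEL_GROUPS = (
--     (DocumentLevel.LEVEL_1_STRATEGIC, frozenset({
--         "requirements", "requirementsanalyst", "stakeholderdocumentation",
--         "stakeholdercommunication", "projectcharter", "businessmodel",
--         "marketingplan"})),
--     (DocumentLevel.LEVEL_2_PRODUCT, frozenset({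
--         "pmdocumentation", "userstories", "wbsagent",
--         "workbreakdownstructure"})),
--     (DocumentLevel.LEVEL_3_TECHNICAL, frozenset({
--         "technicaldocumentation", "apidocumentation", "databaseschema",
--         "setupguide", "legalcompliance"})),
-- )
--
-- def get_document_level(doc_type: str) -> DocumentLevel:
--     """Get the level for a document type (reverse-index version)."""
--     normalized = doc_type.lower().replace('_', '').replace('-', '')
--     for level, names in _LEVEL_GROUPS:
--         if normalized in names:
--             return level
--     return DocumentLevel.CROSS_LEVEL
-- ===== Notes on version B (the rewrite author's own statement) =====
-- stated objective: simpler
-- what changed: Inverts the data structure: instead of a key->level dict probed directly and then scanned with per-call key normalization, B keeps a reverse index of three per-level sets of pre-normalized names (the CROSS_LEVEL group is dropped since it coincides with the default) and returns the first level whose set contains the normalized input.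
import Mathlib
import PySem

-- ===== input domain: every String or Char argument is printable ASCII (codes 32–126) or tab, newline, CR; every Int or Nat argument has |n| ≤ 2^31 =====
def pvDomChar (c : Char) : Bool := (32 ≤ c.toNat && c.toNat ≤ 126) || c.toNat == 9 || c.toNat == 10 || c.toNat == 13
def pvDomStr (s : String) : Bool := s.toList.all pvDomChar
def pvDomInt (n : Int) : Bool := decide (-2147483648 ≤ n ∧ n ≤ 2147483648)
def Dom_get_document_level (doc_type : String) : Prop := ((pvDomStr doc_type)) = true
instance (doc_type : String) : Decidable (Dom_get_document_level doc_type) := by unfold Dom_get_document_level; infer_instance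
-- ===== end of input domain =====

-- B inverts the data structure: instead of a key->level dict probed directly and then
-- scanned with per-call key normalization, it keeps three per-level sets of pre-normalized
-- names (the CROSS_LEVEL group coincides with the default and is dropped) and returns the
-- first level whose set contains the normalized input (objective: simpler).

-- ===== PORT A =====
-- doc_type.lower().replace('_','').replace('-','')
def pvNorm (s : String) : String :=
  PySem.Str.replace (PySem.Str.replace (PySem.Str.lower s) "_" "") "-" ""

def pvMappingItems : List (String × String) :=
  [("requirements", "Level 1: Strategic (Entrepreneur)"),
   ("requirements_analyst", "Level 1: Strategic (Entrepreneur)"),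
   ("stakeholder_documentation", "Level 1: Strategic (Entrepreneur)"),
   ("stakeholder_communication", "Level 1: Strategic (Entrepreneur)"),
   ("project_charter", "Level 1: Strategic (Entrepreneur)"),
   ("business_model", "Level 1: Strategic (Entrepreneur)"),
   ("marketing_plan", "Level 1: Strategic (Entrepreneur)"),
   ("pm_documentation", "Level 2: Product (Product Manager)"),
   ("user_stories", "Level 2: Product (Product Manager)"),
   ("wbs_agent", "Level 2: Product (Product Manager)"),
   ("work_breakdown_structure", "Level 2: Product (Product Manager)"),
   ("technical_documentation", "Level 3: Technical (Programmer)"),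
   ("api_documentation", "Level 3: Technical (Programmer)"),
   ("database_schema", "Level 3: Technical (Programmer)"),
   ("setup_guide", "Level 3: Technical (Programmer)"),
   ("legal_compliance", "Level 3: Technical (Programmer)"),
   ("developer_documentation", "Cross-Level (Everyone)"),
   ("user_documentation", "Cross-Level (Everyone)"),
   ("test_documentation", "Cross-Level (Everyone)"),
   ("support_playbook", "Cross-Level (Everyone)"),
   ("quality_reviewer", "Cross-Level (Everyone)"),
   ("format_converter", "Cross-Level (Everyone)"),
   ("claude_cli_documentation", "Cross-Level (Everyone)")]

def pvMapping : PySem.Dict String String := PySem.Dict.ofList pvMappingItems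

-- A's 'for key, level in DOCUMENT_LEVEL_MAPPING.items(): if key_normalized == normalized: return level'
def pvScan : List (String × String) → String → Option String
  | [], _ => none
  | (k, v) :: rest, n => if pvNorm k == n then some v else pvScan rest n

def get_document_level (doc_type : String) : String :=
  let normalized := pvNorm doc_type
  if pvMapping.contains doc_type then
    (pvMapping.get? doc_type).getD "Cross-Level (Everyone)"  -- KeyError impossible here
  else
    match pvScan pvMappingItems normalized with
    | some level => level
    | none => "Cross-Level (Everyone)"

-- ===== PORT B =====
-- reverse index: the three non-default levels with their sets of pre-normalized names
def pvLevelGroups : List (String × PySem.Set String) :=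
  [("Level 1: Strategic (Entrepreneur)", PySem.Set.ofList
     ["requirements", "requirementsanalyst", "stakeholderdocumentation",
      "stakeholdercommunication", "projectcharter", "businessmodel", "marketingplan"]),
   ("Level 2: Product (Product Manager)", PySem.Set.ofList
     ["pmdocumentation", "userstories", "wbsagent", "workbreakdownstructure"]),
   ("Level 3: Technical (Programmer)", PySem.Set.ofList
     ["technicaldocumentation", "apidocumentation", "databaseschema",
      "setupguide", "legalcompliance"])]

-- 'for level, names in _LEVEL_GROUPS: if normalized in names: return level'
def pvFindLevel : List (String × PySem.Set String) → String → String
  | [], _ => "Cross-Level (Everyone)"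
  | (lvl, names) :: rest, n => if names.contains n then lvl else pvFindLevel rest n

def get_document_level_alt (doc_type : String) : String :=
  let normalized := pvNorm doc_type
  pvFindLevel pvLevelGroups normalized

-- ===== PRECONDITION & SPEC =====
def Spec_get_document_level (doc_type : String) (out : String) : Prop := out = get_document_level_alt doc_type
instance (doc_type : String) (out : String) : Decidable (Spec_get_document_level doc_type out) := by unfold Spec_get_document_level; infer_instance

-- ===== CLAIM (what is proved, stated in full; the proofs are below) =====
def Claim_equal_get_document_level : Prop := ∀ (doc_type : String), Dom_get_document_level doc_type → Spec_get_document_level doc_type (get_document_level doc_type)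

-- ===== LEMMAS AND PROOFS =====

-- first-match lookup by key equality (pvScan with its per-key normalization factored out)
def pvLookup : List (String × String) → String → Option String
  | [], _ => none
  | (k, v) :: rest, n => if k == n then some v else pvLookup rest n

theorem pvScan_eq_lookup (l : List (String × String)) (n : String) :
    pvScan l n = pvLookup (l.map fun kv => (pvNorm kv.1, kv.2)) n := by
  induction l with
  | nil => rfl
  | cons kv rest ih => obtain ⟨k, v⟩ := kv; simp [pvScan, pvLookup, ih]

-- the normalized items, grouped: each level's block is its name list paired with a constant value
def pvG1 : List String :=
  ["requirements", "requirementsanalyst", "stakeholderdocumentation",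
   "stakeholdercommunication", "projectcharter", "businessmodel", "marketingplan"]
def pvG2 : List String :=
  ["pmdocumentation", "userstories", "wbsagent", "workbreakdownstructure"]
def pvG3 : List String :=
  ["technicaldocumentation", "apidocumentation", "databaseschema",
   "setupguide", "legalcompliance"]
def pvG4 : List String :=
  ["developerdocumentation", "userdocumentation", "testdocumentation",
   "supportplaybook", "qualityreviewer", "formatconverter", "claudeclidocumentation"]

set_option maxRecDepth 8192 in
theorem pvMapping_normalized :
    pvMappingItems.map (fun kv => (pvNorm kv.1, kv.2)) =
      (pvG1.map fun k => (k, "Level 1: Strategic (Entrepreneur)")) ++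
      (pvG2.map fun k => (k, "Level 2: Product (Product Manager)")) ++
      (pvG3.map fun k => (k, "Level 3: Technical (Programmer)")) ++
      (pvG4.map fun k => (k, "Cross-Level (Everyone)")) := by decide

theorem pvLookup_append (l1 l2 : List (String × String)) (n : String) :
    pvLookup (l1 ++ l2) n = (pvLookup l1 n).or (pvLookup l2 n) := by
  induction l1 with
  | nil => rfl
  | cons kv rest ih =>
    obtain ⟨k, v⟩ := kv
    by_cases h : k = n <;> simp [pvLookup, h, ih]

theorem pvLookup_const (l : List String) (v n : String) :
    pvLookup (l.map fun k => (k, v)) n = if l.contains n then some v else none := by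
  induction l with
  | nil => rfl
  | cons k rest ih =>
    simp only [List.map_cons, pvLookup, List.contains_cons]
    by_cases h : k = n
    · subst h; simp
    · have hb : (k == n) = false := by simpa using h
      have hb' : (n == k) = false := by simpa using (Ne.symm h)
      simp [hb, hb', ih]

-- each literal ofList set evaluates to its (duplicate-free) element list
theorem pvSet1 : PySem.Set.ofList pvG1 = pvG1 := by decide
theorem pvSet2 : PySem.Set.ofList pvG2 = pvG2 := by decide
theorem pvSet3 : PySem.Set.ofList pvG3 = pvG3 := by decide

theorem pvLookup_eq_find (n : String) :
    (pvLookup (pvMappingItems.map fun kv => (pvNorm kv.1, kv.2)) n).getD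
        "Cross-Level (Everyone)" = pvFindLevel pvLevelGroups n := by
  rw [pvMapping_normalized, pvLookup_append, pvLookup_append, pvLookup_append,
    pvLookup_const, pvLookup_const, pvLookup_const, pvLookup_const]
  show _ = pvFindLevel
      [("Level 1: Strategic (Entrepreneur)", PySem.Set.ofList pvG1),
       ("Level 2: Product (Product Manager)", PySem.Set.ofList pvG2),
       ("Level 3: Technical (Programmer)", PySem.Set.ofList pvG3)] n
  simp only [pvFindLevel, PySem.Set.contains_eq_listContains, pvSet1, pvSet2, pvSet3]
  by_cases h1 : n ∈ pvG1 <;> by_cases h2 : n ∈ pvG2 <;>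
    by_cases h3 : n ∈ pvG3 <;> by_cases h4 : n ∈ pvG4 <;>
      simp [h1, h2, h3, h4]

theorem pvA_eq_scan (s : String) (h : pvMapping.contains s = false) :
    get_document_level s =
      match pvScan pvMappingItems (pvNorm s) with
      | some level => level
      | none => "Cross-Level (Everyone)" := by
  simp [get_document_level, h]

-- ===== VERDICT (by name: the statement is the Claim_ definition above) =====
theorem get_document_level_spec : Claim_equal_get_document_level := by
  intro s _
  show get_document_level s = get_document_level_alt s
  by_cases hc : pvMapping.contains s = true
  · have hk : s ∈ pvMapping.keys := (PySem.Dict.contains_iff_mem_keys _ _).mp hc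
    have hkeys : pvMapping.keys = pvMappingItems.map Prod.fst := by decide
    rw [hkeys] at hk
    simp only [pvMappingItems, List.map_cons, List.map_nil, List.mem_cons,
      List.not_mem_nil, or_false] at hk
    rcases hk with h|h|h|h|h|h|h|h|h|h|h|h|h|h|h|h|h|h|h|h|h|h|h <;> subst h <;> decide
  · rw [pvA_eq_scan s (by simpa using hc)]
    show _ = pvFindLevel pvLevelGroups (pvNorm s)
    rw [pvScan_eq_lookup, ← pvLookup_eq_find (pvNorm s)]
    cases pvLookup (pvMappingItems.map fun kv => (pvNorm kv.1, kv.2)) (pvNorm s) <;> rfl
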